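-- pv_equiv track=rewrite | github.com/aisspr/leetcode | GCA/q3.py | createAnagram
-- ===== SOURCE A (Python) =====
-- def createAnagram(s,t):
--     from collections import Counter
--     cnt_s = Counter(s)
--     cnt_t = Counter(t)
--
--     operations = 0
--     for c in cnt_s:
--         if cnt_s[c] > cnt_t.get(c,0):
--             operations += cnt_s[c] - cnt_t.get(c,0)
--
--     return operations
-- ===== SOURCE B (Python) =====
-- def createAnagram(s, t):
--     a = sorted(s)
--     b = sorted(t)
--     i = j = matched = 0
--     while i < len(a) and j < len(b):
--         if a[i] == b[j]:
--             matched += 1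
--             i += 1
--             j += 1
--         elif a[i] < b[j]:
--             i += 1
--         else:
--             j += 1
--     return len(s) - matched
-- ===== Notes on version B (the rewrite author's own statement) =====
-- stated objective: alternative
-- what changed: B drops the Counter dictionaries entirely: it sorts both strings and walks them with a two-pointer merge counting how many characters of s can be matched one-to-one in t, returning len(s) minus that match count.
import Mathlib
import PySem

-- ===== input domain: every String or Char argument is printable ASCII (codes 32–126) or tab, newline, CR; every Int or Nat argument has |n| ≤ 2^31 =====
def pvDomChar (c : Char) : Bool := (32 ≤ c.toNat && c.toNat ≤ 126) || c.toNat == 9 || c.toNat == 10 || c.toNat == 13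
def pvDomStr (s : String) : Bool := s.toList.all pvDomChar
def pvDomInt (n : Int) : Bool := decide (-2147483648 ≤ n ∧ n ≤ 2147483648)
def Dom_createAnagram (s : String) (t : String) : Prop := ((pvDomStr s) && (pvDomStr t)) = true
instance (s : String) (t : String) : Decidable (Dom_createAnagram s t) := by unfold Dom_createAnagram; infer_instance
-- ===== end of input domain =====

-- B replaces A's Counter dictionaries by sorting both strings and matching them with a
-- two-pointer merge; the answer is len(s) minus the number of matched characters.

-- ===== PORT A =====
def createAnagram (s : String) (t : String) : Int :=
  let cnt_s := PySem.Dict.counter s.toList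
  let cnt_t := PySem.Dict.counter t.toList
  cnt_s.keys.foldl (fun operations c =>
    if cnt_s.getD c 0 > cnt_t.getD c 0 then
      operations + (cnt_s.getD c 0 - cnt_t.getD c 0)
    else operations) 0

-- ===== PORT B =====
-- the while loop of Source B: two pointers over the two sorted lists, counting matches
def pvMerge : List Char → List Char → Int
  | [], _ => 0
  | _ :: _, [] => 0
  | x :: xs, y :: ys =>
    if x = y then 1 + pvMerge xs ys
    else if x < y then pvMerge xs (y :: ys)
    else pvMerge (x :: xs) ys
termination_by a b => a.length + b.length

def createAnagram_alt (s : String) (t : String) : Int :=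
  let a := PySem.List.sorted s.toList (fun c => c) false
  let b := PySem.List.sorted t.toList (fun c => c) false
  (s.toList.length : Int) - pvMerge a b

-- ===== PRECONDITION & SPEC =====
def Spec_createAnagram (s : String) (t : String) (out : Int) : Prop := out = createAnagram_alt s t
instance (s : String) (t : String) (out : Int) : Decidable (Spec_createAnagram s t out) := by unfold Spec_createAnagram; infer_instance

-- ===== CLAIM (what is proved, stated in full; the proofs are below) =====
def Claim_equal_createAnagram : Prop := ∀ (s : String) (t : String), Dom_createAnagram s t → Spec_createAnagram s t (createAnagram s t)

-- ===== LEMMAS AND PROOFS =====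

-- A's accumulation loop as a sum of per-key contributions.
theorem foldl_excess (g : Char → Int) (h : Char → Int) :
    ∀ (L : List Char) (a : Int),
      L.foldl (fun ops c => if g c > h c then ops + (g c - h c) else ops) a
        = a + (L.map (fun c => if g c > h c then g c - h c else 0)).sum := by
  intro L
  induction L with
  | nil => intro a; simp
  | cons x xs ih =>
    intro a
    simp only [List.foldl_cons, List.map_cons, List.sum_cons, ih]
    split_ifs <;> ring

-- sum of counts over the distinct elements is the length (Int version, over PySem.Set.ofList)
theorem sum_count_ofList (xs : List Char) :
    (((PySem.Set.ofList xs).map (fun k => (xs.count k : Int)))).sum = (xs.length : Int) := by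
  have hperm : List.Perm (PySem.Set.ofList xs) xs.dedup := by
    rw [List.perm_ext_iff_of_nodup (PySem.Set.nodup_ofList xs) xs.nodup_dedup]
    intro a
    rw [PySem.Set.mem_ofList, List.mem_dedup]
  have h1 : (((PySem.Set.ofList xs).map (fun k => (xs.count k : Int)))).sum
      = ((xs.dedup.map (fun k => (xs.count k : Int)))).sum :=
    (hperm.map _).sum_eq
  have h2 : (xs.dedup.map (fun x => xs.count x)).sum = xs.length :=
    List.sum_map_count_dedup_eq_length xs
  rw [h1]
  have : (xs.dedup.map (fun k => (xs.count k : Int))).sum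
      = ((xs.dedup.map (fun x => xs.count x)).sum : Int) := by
    induction xs.dedup with
    | nil => simp
    | cons y ys ih => simp [ih]
  rw [this, h2]

theorem map_sum_sub (v w : Char → Int) (L : List Char) :
    (L.map (fun c => v c - w c)).sum = (L.map v).sum - (L.map w).sum := by
  induction L with
  | nil => simp
  | cons x xs ih => simp [ih]; ring

-- A equals len(s) minus the sum of per-character minima over the distinct chars of s.
theorem createAnagram_eq_len_sub_min (s t : String) :
    createAnagram s t = (s.toList.length : Int)
      - (((PySem.Set.ofList s.toList).map
          (fun c => min (s.toList.count c : Int) (t.toList.count c : Int)))).sum := by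
  unfold createAnagram
  simp only [PySem.Dict.keys_counter, PySem.Dict.getD_counter]
  rw [foldl_excess (fun c => (s.toList.count c : Int)) (fun c => (t.toList.count c : Int))]
  rw [zero_add, ← sum_count_ofList s.toList]
  rw [← map_sum_sub (fun c => (s.toList.count c : Int))
        (fun c => min (s.toList.count c : Int) (t.toList.count c : Int))]
  apply congrArg
  apply List.map_congr_left
  intro c _
  by_cases h : (s.toList.count c : Int) > (t.toList.count c : Int)
  · rw [if_pos h]; omega
  · rw [if_neg h]; omega

-- the sum of minima is the cardinality of the multiset intersection
theorem sum_min_eq_card (u v : List Char) :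
    (((PySem.Set.ofList u).map (fun c => min (u.count c) (v.count c)))).sum
      = Multiset.card ((u : Multiset Char) ∩ (v : Multiset Char)) := by
  have hperm : List.Perm (PySem.Set.ofList u) u.dedup := by
    rw [List.perm_ext_iff_of_nodup (PySem.Set.nodup_ofList u) u.nodup_dedup]
    intro a; rw [PySem.Set.mem_ofList, List.mem_dedup]
  rw [(hperm.map _).sum_eq]
  -- RHS: card = sum over the intersection's toFinset, extended to u's toFinset
  have hcard := Multiset.toFinset_sum_count_eq ((u : Multiset Char) ∩ (v : Multiset Char))
  rw [← hcard]
  have hsub : ((u : Multiset Char) ∩ (v : Multiset Char)).toFinset ⊆ u.toFinset := by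
    intro a ha
    simp only [Multiset.mem_toFinset, Multiset.mem_inter] at ha
    simpa [List.mem_toFinset] using ha.1
  rw [Finset.sum_subset hsub (by
    intro a _ ha
    simp only [Multiset.mem_toFinset] at ha
    exact Multiset.count_eq_zero_of_notMem ha)]
  have : ∀ a, Multiset.count a ((u : Multiset Char) ∩ (v : Multiset Char))
      = min (u.count a) (v.count a) := by
    intro a; simp
  simp only [this]
  rw [← List.sum_toFinset _ u.nodup_dedup]
  congr 1
  ext a; simp

-- multiset identities used by the merge
theorem inter_cons_cons (x : Char) (A B : Multiset Char) :
    (x ::ₘ A) ∩ (x ::ₘ B) = x ::ₘ (A ∩ B) := by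
  ext a
  simp only [Multiset.count_inter, Multiset.count_cons]
  by_cases h : a = x <;> simp [h]

theorem inter_cons_left_notMem (x : Char) (A B : Multiset Char) (h : x ∉ B) :
    (x ::ₘ A) ∩ B = A ∩ B := by
  ext a
  simp only [Multiset.count_inter, Multiset.count_cons]
  by_cases hax : a = x
  · subst hax
    rw [Multiset.count_eq_zero_of_notMem h]
    simp
  · simp [hax]

theorem inter_cons_right_notMem (y : Char) (A B : Multiset Char) (h : y ∉ A) :
    A ∩ (y ::ₘ B) = A ∩ B := by
  ext a
  simp only [Multiset.count_inter, Multiset.count_cons]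
  by_cases hay : a = y
  · subst hay
    rw [Multiset.count_eq_zero_of_notMem h]
    simp
  · simp [hay]

-- the two-pointer merge on sorted lists computes the multiset-intersection size
theorem pvMerge_eq_card : ∀ (a b : List Char),
    a.Pairwise (· ≤ ·) → b.Pairwise (· ≤ ·) →
    pvMerge a b = (Multiset.card ((a : Multiset Char) ∩ (b : Multiset Char)) : Int)
  | [], b, _, _ => by simp [pvMerge]
  | x :: xs, [], _, _ => by simp [pvMerge]
  | x :: xs, y :: ys, ha, hb => by
    have hxs := (List.pairwise_cons.1 ha).2
    have hys := (List.pairwise_cons.1 hb).2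
    rw [pvMerge]
    by_cases hxy : x = y
    · subst hxy
      rw [if_pos rfl]
      rw [pvMerge_eq_card xs ys hxs hys]
      have : ((x :: xs : List Char) : Multiset Char) ∩ ((x :: ys : List Char) : Multiset Char)
          = x ::ₘ ((xs : Multiset Char) ∩ (ys : Multiset Char)) := by
        rw [← Multiset.cons_coe, ← Multiset.cons_coe]
        exact inter_cons_cons x (xs : Multiset Char) (ys : Multiset Char)
      rw [this]
      simp
      omega
    · rw [if_neg hxy]
      by_cases hlt : x < y
      · rw [if_pos hlt]
        rw [pvMerge_eq_card xs (y :: ys) hxs hb]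
        have hxnotin : x ∉ ((y :: ys : List Char) : Multiset Char) := by
          intro hmem
          rw [Multiset.mem_coe, List.mem_cons] at hmem
          rcases hmem with h | h
          · exact hxy h
          · have := (List.pairwise_cons.1 hb).1 x h
            exact absurd (lt_of_lt_of_le hlt this) (lt_irrefl x)
        have : ((x :: xs : List Char) : Multiset Char) ∩ ((y :: ys : List Char) : Multiset Char)
            = (xs : Multiset Char) ∩ ((y :: ys : List Char) : Multiset Char) := by
          simpa using inter_cons_left_notMem x (xs : Multiset Char) _ hxnotin
        rw [this]
      · rw [if_neg hlt]
        rw [pvMerge_eq_card (x :: xs) ys ha hys]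
        have hygt : y < x := lt_of_le_of_ne (le_of_not_gt hlt) (Ne.symm hxy)
        have hynotin : y ∉ ((x :: xs : List Char) : Multiset Char) := by
          intro hmem
          rw [Multiset.mem_coe, List.mem_cons] at hmem
          rcases hmem with h | h
          · exact hxy h.symm
          · have := (List.pairwise_cons.1 ha).1 y h
            exact absurd (lt_of_lt_of_le hygt this) (lt_irrefl y)
        have : ((x :: xs : List Char) : Multiset Char) ∩ ((y :: ys : List Char) : Multiset Char)
            = ((x :: xs : List Char) : Multiset Char) ∩ (ys : Multiset Char) := by
          simpa using inter_cons_right_notMem y _ (ys : Multiset Char) hynotin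
        rw [this]
termination_by a b => a.length + b.length

theorem createAnagram_eq (s t : String) : createAnagram s t = createAnagram_alt s t := by
  rw [createAnagram_eq_len_sub_min]
  have halt : createAnagram_alt s t = (s.toList.length : Int)
      - pvMerge (PySem.List.sorted s.toList (fun c => c) false)
                (PySem.List.sorted t.toList (fun c => c) false) := rfl
  rw [halt]
  have ha := PySem.List.sorted_pairwise s.toList (fun c => c)
  have hb := PySem.List.sorted_pairwise t.toList (fun c => c)
  rw [pvMerge_eq_card _ _ ha hb]
  have hpa : ((PySem.List.sorted s.toList (fun c => c) false : List Char) : Multiset Char)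
      = (s.toList : Multiset Char) :=
    Multiset.coe_eq_coe.2 (PySem.List.sorted_perm s.toList (fun c => c) false)
  have hpb : ((PySem.List.sorted t.toList (fun c => c) false : List Char) : Multiset Char)
      = (t.toList : Multiset Char) :=
    Multiset.coe_eq_coe.2 (PySem.List.sorted_perm t.toList (fun c => c) false)
  rw [hpa, hpb, ← sum_min_eq_card]
  congr 1
  have : (((PySem.Set.ofList s.toList).map
        (fun c => min (s.toList.count c : Int) (t.toList.count c : Int)))).sum
      = (((PySem.Set.ofList s.toList).map
        (fun c => min (s.toList.count c) (t.toList.count c))).sum : Int) := by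
    induction PySem.Set.ofList s.toList with
    | nil => simp
    | cons c cs ih =>
      simp only [List.map_cons, List.sum_cons, ih]
      push_cast
      ring
  rw [this]

-- ===== VERDICT (by name: the statement is the Claim_ definition above) =====
theorem createAnagram_spec : Claim_equal_createAnagram := by
  intro s t _
  unfold Spec_createAnagram
  exact createAnagram_eq s t
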